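-- pv_equiv track=rewrite | github.com/Sherr1Fu/590_hw5 | hw5-st/eqsubstr.py | matching_length_sub_strs
-- ===== SOURCE A (Python) =====
-- def matching_length_sub_strs(s, c1, c2):
--     # WRITE ME
--     result=set()
--     a_length={}
--     b_length={}
--     a_len=0
--     b_len=0
--     index=-1
--     for i, sub in enumerate(s):
--         if sub==c1:
--             if a_len==0:
--                 index=i
--             a_len+=1
--             if (i+1)==len(s) or s[i]!=s[i+1]:
--                 if a_len not in a_length:
--                     a_length[a_len]=[]
--                 a_length[a_len].append(index)
--                 a_len=0
--         if sub==c2: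
--             if b_len==0:
--                 index=i
--             b_len+=1
--             if (i+1)==len(s) or s[i]!=s[i+1]:
--                 if b_len not in b_length:
--                     b_length[b_len]=[]
--                 b_length[b_len].append(index)
--                 b_len=0
--     for key in a_length:
--         if key in b_length:
--             for i in a_length[key]:
--                 for j in b_length[key]:
--                     result.add((i,j,key))
--     return result
-- ===== SOURCE B (Python) =====
-- def matching_length_sub_strs(s, c1, c2):
--     # Two-pointer scan over maximal runs of equal characters, bucketing run
--     # starts by run length, then pairing equal lengths.
--     a_length = {}
--     b_length = {}
--     n = len(s)
--     i = 0
--     while i < n: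
--         j = i
--         while j < n and s[j] == s[i]:
--             j += 1
--         length = j - i
--         if s[i] == c1:
--             a_length.setdefault(length, []).append(i)
--         if s[i] == c2:
--             b_length.setdefault(length, []).append(i)
--         i = j
--     result = set()
--     for k, starts in a_length.items():
--         if k in b_length:
--             for p in starts:
--                 for q in b_length[k]:
--                     result.add((p, q, k))
--     return result
-- ===== Notes on version B (the rewrite author's own statement) =====
-- stated objective: alternative
-- what changed: B replaces A's per-character state machine (two run counters plus a shared sentinel index, with a lookahead s[i+1] boundary test) by a two-pointer scan that consumes one maximal run of equal characters per outer step and buckets its start by its length; the final equal-length pairing loop is unchanged.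
import Mathlib
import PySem

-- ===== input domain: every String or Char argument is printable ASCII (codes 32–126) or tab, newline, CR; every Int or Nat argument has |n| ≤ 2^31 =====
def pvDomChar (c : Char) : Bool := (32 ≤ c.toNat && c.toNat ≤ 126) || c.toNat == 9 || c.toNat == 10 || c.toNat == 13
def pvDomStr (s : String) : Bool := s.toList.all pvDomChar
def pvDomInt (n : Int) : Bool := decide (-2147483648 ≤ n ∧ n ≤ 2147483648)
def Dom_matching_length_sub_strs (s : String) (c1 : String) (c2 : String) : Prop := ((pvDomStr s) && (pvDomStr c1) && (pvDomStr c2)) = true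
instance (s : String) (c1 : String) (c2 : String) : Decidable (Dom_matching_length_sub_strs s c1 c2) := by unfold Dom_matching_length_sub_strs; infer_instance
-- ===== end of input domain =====

-- B replaces A's per-character run state machine by a two-pointer scan over maximal runs;
-- return values are proved identical on all inputs (objective: alternative decomposition, same cost).

-- ===== PORT A =====
-- the final 'for key in a_length: if key in b_length: …' loop of A (B's Python has the same loop verbatim)
def pvBuildRes (aL bL : PySem.Dict Int (List Int)) : List (Int × Int × Int) :=
  aL.items.foldl (fun res kv =>
    if bL.contains kv.1 then
      kv.2.foldl (fun res i => (bL.getD kv.1 []).foldl (fun res j => PySem.Set.add res (i, j, kv.1)) res) res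
    else res) []

-- one iteration of A's 'for i, sub in enumerate(s)' body; state = (a_length, b_length, a_len, b_len, index).
-- 'sub == c1' on a 1-char sub is '[sub] = c1.toList'; s[i]/s[i+1] are in range (i from enumerate, i+1 guarded
-- by the preceding '(i+1)==len(s)' disjunct), ported with pyGetD.
def pvStepA (c1 c2 : String) (cs : List Char) (n : Int)
    (st : PySem.Dict Int (List Int) × PySem.Dict Int (List Int) × Int × Int × Int)
    (p : Int × Char) :
    PySem.Dict Int (List Int) × PySem.Dict Int (List Int) × Int × Int × Int :=
  match st, p with
  | (aL, bL, alen, blen, idx), (i, sub) =>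
    let (aL, alen, idx) :=
      if [sub] = c1.toList then
        let idx := if alen = 0 then i else idx
        let alen := alen + 1
        if i + 1 = n ∨ PySem.List.pyGetD cs i ' ' ≠ PySem.List.pyGetD cs (i + 1) ' ' then
          let aL := if aL.contains alen then aL else aL.insert alen ([] : List Int)
          let aL := aL.insert alen (aL.getD alen [] ++ [idx])
          (aL, 0, idx)
        else (aL, alen, idx)
      else (aL, alen, idx)
    let (bL, blen, idx) :=
      if [sub] = c2.toList then
        let idx := if blen = 0 then i else idx
        let blen := blen + 1
        if i + 1 = n ∨ PySem.List.pyGetD cs i ' ' ≠ PySem.List.pyGetD cs (i + 1) ' ' then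
          let bL := if bL.contains blen then bL else bL.insert blen ([] : List Int)
          let bL := bL.insert blen (bL.getD blen [] ++ [idx])
          (bL, 0, idx)
        else (bL, blen, idx)
      else (bL, blen, idx)
    (aL, bL, alen, blen, idx)

def matching_length_sub_strs (s : String) (c1 : String) (c2 : String) : List (Int × Int × Int) :=
  let cs := s.toList
  let n : Int := cs.length
  let st := (PySem.List.enumerate cs 0).foldl (pvStepA c1 c2 cs n)
    (PySem.Dict.empty, PySem.Dict.empty, 0, 0, -1)
  pvBuildRes st.1 st.2.1

-- ===== PORT B =====
-- B's inner 'while j < n and s[j] == s[i]: j += 1': number of chars of xs continuing a run of x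
def pvRunExt (x : Char) : List Char → Nat
  | [] => 0
  | y :: ys => if y = x then pvRunExt x ys + 1 else 0

-- 'd.setdefault(length, []).append(i)'
def pvBucketAdd (d : PySem.Dict Int (List Int)) (k v : Int) : PySem.Dict Int (List Int) :=
  let d := d.setdefault k []
  d.insert k (d.getD k [] ++ [v])

-- B's outer while loop: one maximal run per step
def pvScanB (c1 c2 : String) : List Char → Int →
    PySem.Dict Int (List Int) × PySem.Dict Int (List Int) →
    PySem.Dict Int (List Int) × PySem.Dict Int (List Int)
  | [], _, st => st
  | x :: xs, pos, (aL, bL) =>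
    let k := pvRunExt x xs
    let len : Int := (k : Int) + 1
    let aL := if [x] = c1.toList then pvBucketAdd aL len pos else aL
    let bL := if [x] = c2.toList then pvBucketAdd bL len pos else bL
    pvScanB c1 c2 (xs.drop k) (pos + len) (aL, bL)
termination_by cs => cs.length
decreasing_by simp

def matching_length_sub_strs_alt (s : String) (c1 : String) (c2 : String) : List (Int × Int × Int) :=
  let st := pvScanB c1 c2 s.toList 0 (PySem.Dict.empty, PySem.Dict.empty)
  pvBuildRes st.1 st.2

-- ===== PRECONDITION & SPEC =====
def Spec_matching_length_sub_strs (s : String) (c1 : String) (c2 : String) (out : List (Int × Int × Int)) : Prop := out = matching_length_sub_strs_alt s c1 c2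
instance (s : String) (c1 : String) (c2 : String) (out : List (Int × Int × Int)) : Decidable (Spec_matching_length_sub_strs s c1 c2 out) := by unfold Spec_matching_length_sub_strs; infer_instance

-- ===== CLAIM (what is proved, stated in full; the proofs are below) =====
def Claim_equal_matching_length_sub_strs : Prop := ∀ (s : String) (c1 : String) (c2 : String), Dom_matching_length_sub_strs s c1 c2 → Spec_matching_length_sub_strs s c1 c2 (matching_length_sub_strs s c1 c2)

-- ===== LEMMAS AND PROOFS =====

-- run-length helper facts for B's inner while loop
lemma pvRunExt_take (x : Char) (xs : List Char) :
    xs.take (pvRunExt x xs) = List.replicate (pvRunExt x xs) x := by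
  induction xs with
  | nil => simp [pvRunExt]
  | cons y ys ih =>
    by_cases h : y = x
    · simp [pvRunExt, h, List.replicate_succ, ih]
    · simp [pvRunExt, h]

lemma pvRunExt_head_drop (x : Char) (xs : List Char) :
    ∀ y, (xs.drop (pvRunExt x xs)).head? = some y → y ≠ x := by
  induction xs with
  | nil => simp [pvRunExt]
  | cons y ys ih =>
    by_cases h : y = x
    · simpa [pvRunExt, h] using ih
    · intro z hz
      have hy : y = z := by simpa [pvRunExt, h] using hz
      exact hy ▸ h

lemma pv_getD_drop (cs zs : List Char) (z : Char) (pos : Nat) (h : cs.drop pos = z :: zs) :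
    cs.getD pos ' ' = z := by
  have h0 : cs[pos]? = some z := by
    have h1 : (cs.drop pos)[0]? = cs[pos + 0]? := List.getElem?_drop
    rw [h] at h1
    simpa using h1.symm
  simp [List.getD_eq_getElem?_getD, h0]

lemma pv_pos_lt (cs : List Char) (z : Char) (zs : List Char) (pos : Nat)
    (h : cs.drop pos = z :: zs) : pos < cs.length := by
  by_contra hc
  rw [Nat.not_lt] at hc
  simp [List.drop_eq_nil_of_le hc] at h

lemma pv_cast (pos : Nat) : ((pos : Int) + 1) = ((pos + 1 : Nat) : Int) := by push_cast; ring

-- A's two-step 'if key not in d: d[key]=[] ; d[key].append(v)' equals B's 'd.setdefault(key, []).append(v)'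
lemma pv_bucket_eq (d : PySem.Dict Int (List Int)) (k v : Int) :
    (if d.contains k then d else d.insert k ([] : List Int)).insert k
      ((if d.contains k then d else d.insert k ([] : List Int)).getD k [] ++ [v])
    = pvBucketAdd d k v := by
  by_cases h : d.contains k <;>
    simp [pvBucketAdd, h, PySem.Dict.setdefault_of_contains, PySem.Dict.setdefault_of_not_contains]

-- A's loop over one maximal run of x (entered with counters t on the matching sides)
lemma pv_run_aux (c1 c2 : String) (cs : List Char) (x : Char) (rest : List Char)
    (hrest : ∀ y, rest.head? = some y → y ≠ x) :
    ∀ (r pos t : Nat) (idx : Int) (aL bL : PySem.Dict Int (List Int)),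
    cs.drop pos = List.replicate (r + 1) x ++ rest →
    (PySem.List.enumerate (List.replicate (r + 1) x) (pos : Int)).foldl
        (pvStepA c1 c2 cs (cs.length : Int))
        (aL, bL, (if [x] = c1.toList then (t : Int) else 0),
                 (if [x] = c2.toList then (t : Int) else 0), idx)
      = ((if [x] = c1.toList then pvBucketAdd aL ((t : Int) + (r : Int) + 1) (if t = 0 then (pos : Int) else idx) else aL),
         (if [x] = c2.toList then pvBucketAdd bL ((t : Int) + (r : Int) + 1) (if t = 0 then (pos : Int) else idx) else bL),
         0, 0,
         (if [x] = c1.toList ∨ [x] = c2.toList then (if t = 0 then (pos : Int) else idx) else idx)) := by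
  intro r
  induction r with
  | zero =>
    intro pos t idx aL bL hdrop
    simp only [List.replicate_succ, List.replicate_zero, List.cons_append, List.nil_append] at hdrop
    have hgx : cs.getD pos ' ' = x := pv_getD_drop cs rest x pos hdrop
    have hg1 : PySem.List.pyGetD cs (pos : Int) ' ' = x := by
      rw [PySem.List.pyGetD_natCast]; exact hgx
    have hC : ((pos : Int) + 1 = (cs.length : Int)) ∨
        PySem.List.pyGetD cs (pos : Int) ' ' ≠ PySem.List.pyGetD cs ((pos : Int) + 1) ' ' := by
      cases hr : rest with
      | nil =>
        left
        have hlen : (cs.drop pos).length = cs.length - pos := List.length_drop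
        rw [hdrop, hr] at hlen
        have hpos : pos < cs.length := pv_pos_lt cs x rest pos hdrop
        simp at hlen
        omega
      | cons y ys =>
        right
        have hty : cs.drop (pos + 1) = y :: ys := by
          rw [← List.tail_drop, hdrop, hr]
          rfl
        have hg2 : PySem.List.pyGetD cs ((pos : Int) + 1) ' ' = y := by
          rw [pv_cast pos, PySem.List.pyGetD_natCast]
          exact pv_getD_drop cs ys y (pos + 1) hty
        have hyx : y ≠ x := hrest y (by rw [hr]; rfl)
        rw [hg1, hg2]
        exact fun h => hyx h.symm
    simp only [List.replicate_succ, List.replicate_zero, List.cons_append, List.nil_append,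
      PySem.List.enumerate_cons, PySem.List.enumerate_nil, List.foldl_cons, List.foldl_nil, pvStepA]
    rw [if_pos hC, if_pos hC]
    by_cases hA : [x] = c1.toList <;> by_cases hB : [x] = c2.toList
    · simp only [eq_true hA, eq_true hB, ite_true, Nat.cast_eq_zero, Nat.cast_zero, add_zero,
        zero_add, eq_self_iff_true, true_or, or_true]
      rw [pv_bucket_eq, pv_bucket_eq]
      try by_cases ht : t = 0 <;> simp [ht]
    · simp only [eq_true hA, hB, ite_true, ite_false, Nat.cast_eq_zero, Nat.cast_zero, add_zero,
        zero_add, eq_self_iff_true, true_or, or_true]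
      rw [pv_bucket_eq]
    · simp only [hA, eq_true hB, ite_true, ite_false, Nat.cast_eq_zero, Nat.cast_zero, add_zero,
        zero_add, eq_self_iff_true, true_or, or_true]
      rw [pv_bucket_eq]
    · simp [hA, hB]
  | succ r ih =>
    intro pos t idx aL bL hdrop
    have hx1 : cs.drop pos = x :: (List.replicate (r + 1) x ++ rest) := by
      rw [hdrop, List.replicate_succ, List.cons_append]
    have hx2 : cs.drop (pos + 1) = List.replicate (r + 1) x ++ rest := by
      rw [← List.tail_drop, hx1]
      rfl
    have hgx : cs.getD pos ' ' = x := pv_getD_drop cs _ x pos hx1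
    have hgx2 : cs.getD (pos + 1) ' ' = x := by
      have h3 : cs.drop (pos + 1) = x :: (List.replicate r x ++ rest) := by
        rw [hx2, List.replicate_succ, List.cons_append]
      exact pv_getD_drop cs _ x (pos + 1) h3
    have hg1 : PySem.List.pyGetD cs (pos : Int) ' ' = x := by
      rw [PySem.List.pyGetD_natCast]; exact hgx
    have hg2 : PySem.List.pyGetD cs ((pos : Int) + 1) ' ' = x := by
      rw [pv_cast pos, PySem.List.pyGetD_natCast]; exact hgx2
    have hlen : (cs.drop pos).length = cs.length - pos := List.length_drop
    rw [hx1] at hlen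
    have hpos : pos < cs.length := pv_pos_lt cs x _ pos hx1
    simp only [List.length_cons, List.length_append, List.length_replicate] at hlen
    have hCf : ¬(((pos : Int) + 1 = (cs.length : Int)) ∨
        PySem.List.pyGetD cs (pos : Int) ' ' ≠ PySem.List.pyGetD cs ((pos : Int) + 1) ' ') := by
      rintro (h | h)
      · omega
      · exact h (hg1.trans hg2.symm)
    rw [show List.replicate (r + 1 + 1) x = x :: List.replicate (r + 1) x from List.replicate_succ ..]
    rw [PySem.List.enumerate_cons, List.foldl_cons]
    simp only [pvStepA]
    rw [if_neg hCf, if_neg hCf]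
    have hcast : ((pos : Int) + 1) = ((pos + 1 : Nat) : Int) := pv_cast pos
    have hk : ((t : Int) + 1) + (r : Int) + 1 = (t : Int) + ((r : Int) + 1) + 1 := by ring
    have hii : (if t = 0 then (pos : Int) else if t = 0 then (pos : Int) else idx)
        = (if t = 0 then (pos : Int) else idx) := by
      by_cases ht : t = 0 <;> simp [ht]
    by_cases hA : [x] = c1.toList <;> by_cases hB : [x] = c2.toList
    · have ihs := ih (pos + 1) (t + 1) (if t = 0 then (pos : Int) else idx) aL bL hx2
      simp only [eq_true hA, eq_true hB, ite_true, Nat.succ_ne_zero, ite_false, Nat.cast_add,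
        Nat.cast_one, Nat.cast_eq_zero, eq_self_iff_true, true_or, or_true] at ihs ⊢
      rw [hk] at ihs
      rw [hii, hcast]
      exact ihs
    · have ihs := ih (pos + 1) (t + 1) (if t = 0 then (pos : Int) else idx) aL bL hx2
      simp only [eq_true hA, hB, ite_true, ite_false, Nat.succ_ne_zero, Nat.cast_add,
        Nat.cast_one, Nat.cast_eq_zero, eq_self_iff_true, true_or, or_true, false_or] at ihs ⊢
      rw [hk] at ihs
      rw [hcast]
      exact ihs
    · have ihs := ih (pos + 1) (t + 1) (if t = 0 then (pos : Int) else idx) aL bL hx2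
      simp only [hA, eq_true hB, ite_true, ite_false, Nat.succ_ne_zero, Nat.cast_add,
        Nat.cast_one, Nat.cast_eq_zero, eq_self_iff_true, true_or, or_true, false_or] at ihs ⊢
      rw [hk] at ihs
      rw [hcast]
      exact ihs
    · have ihs := ih (pos + 1) (t + 1) idx aL bL hx2
      simp only [hA, hB, ite_false, or_self, if_false] at ihs ⊢
      rw [hcast]
      exact ihs

-- A's whole character loop, started at a run boundary (counters 0), computes B's run scan
lemma pv_scan_eq (c1 c2 : String) (cs : List Char) :
    ∀ (n : Nat) (tail : List Char) (pos : Nat) (aL bL : PySem.Dict Int (List Int)) (idx : Int),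
    tail.length ≤ n →
    cs.drop pos = tail →
    ∃ idx',
      (PySem.List.enumerate tail (pos : Int)).foldl (pvStepA c1 c2 cs (cs.length : Int))
        (aL, bL, 0, 0, idx)
      = ((pvScanB c1 c2 tail (pos : Int) (aL, bL)).1,
         (pvScanB c1 c2 tail (pos : Int) (aL, bL)).2, 0, 0, idx') := by
  intro n
  induction n with
  | zero =>
    intro tail pos aL bL idx hlen _hdrop
    have htail : tail = [] := List.eq_nil_of_length_eq_zero (Nat.le_zero.mp hlen)
    subst htail
    exact ⟨idx, by simp [pvScanB, PySem.List.enumerate_nil]⟩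
  | succ n ihn =>
    intro tail pos aL bL idx hlen hdrop
    cases tail with
    | nil => exact ⟨idx, by simp [pvScanB, PySem.List.enumerate_nil]⟩
    | cons x xs =>
      have hx : xs.take (pvRunExt x xs) = List.replicate (pvRunExt x xs) x := pvRunExt_take x xs
      have hxs : List.replicate (pvRunExt x xs) x ++ xs.drop (pvRunExt x xs) = xs := by
        conv_rhs => rw [← List.take_append_drop (pvRunExt x xs) xs]
        rw [hx]
      have hsplit : List.replicate (pvRunExt x xs + 1) x ++ xs.drop (pvRunExt x xs) = x :: xs := by
        rw [List.replicate_succ, List.cons_append, hxs]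
      have hdrop2 : cs.drop pos = List.replicate (pvRunExt x xs + 1) x ++ xs.drop (pvRunExt x xs) := by
        rw [hdrop, ← hsplit]
      have hrun := pv_run_aux c1 c2 cs x (xs.drop (pvRunExt x xs)) (pvRunExt_head_drop x xs)
        (pvRunExt x xs) pos 0 idx aL bL hdrop2
      simp only [Nat.cast_zero, ite_self, zero_add] at hrun
      have hscan : pvScanB c1 c2 (x :: xs) (pos : Int) (aL, bL) =
          pvScanB c1 c2 (xs.drop (pvRunExt x xs)) ((pos : Int) + ((pvRunExt x xs : Int) + 1))
            ((if [x] = c1.toList then pvBucketAdd aL ((pvRunExt x xs : Int) + 1) (pos : Int) else aL),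
             (if [x] = c2.toList then pvBucketAdd bL ((pvRunExt x xs : Int) + 1) (pos : Int) else bL)) := by
        simp [pvScanB]
      have hdk : cs.drop (pos + (pvRunExt x xs + 1)) = xs.drop (pvRunExt x xs) := by
        have h1 : cs.drop (pos + (pvRunExt x xs + 1)) = (cs.drop pos).drop (pvRunExt x xs + 1) := by
          rw [List.drop_drop, Nat.add_comm]
        rw [h1, hdrop]
        simp
      have hlen2 : (xs.drop (pvRunExt x xs)).length ≤ n := by
        simp only [List.length_cons] at hlen
        simp only [List.length_drop]
        omega
      have hc2 : ((pos : Int) + ((pvRunExt x xs + 1 : Nat) : Int)) = ((pos + (pvRunExt x xs + 1) : Nat) : Int) := by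
        push_cast; ring
      have hc3 : ((pos : Int) + ((pvRunExt x xs : Int) + 1)) = ((pos + (pvRunExt x xs + 1) : Nat) : Int) := by
        push_cast; ring
      rw [hscan, hc3, ← hsplit, PySem.List.enumerate_append, List.foldl_append,
        List.length_replicate, hc2, hrun]
      exact ihn (xs.drop (pvRunExt x xs)) (pos + (pvRunExt x xs + 1))
        (if [x] = c1.toList then pvBucketAdd aL ((pvRunExt x xs : Int) + 1) (pos : Int) else aL)
        (if [x] = c2.toList then pvBucketAdd bL ((pvRunExt x xs : Int) + 1) (pos : Int) else bL)
        (if [x] = c1.toList ∨ [x] = c2.toList then (pos : Int) else idx) hlen2 hdk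

-- ===== VERDICT (by name: the statement is the Claim_ definition above) =====
theorem matching_length_sub_strs_spec : Claim_equal_matching_length_sub_strs := by
  intro s c1 c2 _hD
  unfold Spec_matching_length_sub_strs matching_length_sub_strs matching_length_sub_strs_alt
  obtain ⟨idx', h⟩ := pv_scan_eq c1 c2 s.toList s.toList.length s.toList 0
    PySem.Dict.empty PySem.Dict.empty (-1) le_rfl rfl
  exact congrArg
    (fun st : PySem.Dict Int (List Int) × PySem.Dict Int (List Int) × Int × Int × Int =>
      pvBuildRes st.1 st.2.1) h
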